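-- pv_equiv track=rewrite | github.com/phammai1410/Du_An | frontend/rag_gui.py | _slugify_identifier
-- ===== SOURCE A (Python) =====
-- from typing import Any, Callable, Dict, List, Optional, Sequence, Tuple, Set, Union
--
-- def _slugify_identifier(value: str) -> str:
--     chars: List[str] = []
--     for char in value:
--         lower = char.lower()
--         if lower.isalnum():
--             chars.append(lower)
--         else:
--             chars.append("-")
--     slug = "".join(chars).strip("-")
--     while "--" in slug:
--         slug = slug.replace("--", "-")
--     return slug or "default"
-- ===== SOURCE B (Python) =====
-- def _slugify_identifier(value: str) -> str:
--     tokens = []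
--     buf = ""
--     for char in value:
--         lower = char.lower()
--         if lower.isalnum():
--             buf += lower
--         else:
--             if buf:
--                 tokens.append(buf)
--                 buf = ""
--     if buf:
--         tokens.append(buf)
--     return "-".join(tokens) or "default"
-- ===== Notes on version B (the rewrite author's own statement) =====
-- stated objective: simpler
-- what changed: B builds the slug in a single pass by buffering maximal runs of lowercased alphanumeric characters and joining the finished tokens with single dashes, eliminating A's character map, the two-sided dash strip and the repeated double-dash replacement loop.
import Mathlib
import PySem

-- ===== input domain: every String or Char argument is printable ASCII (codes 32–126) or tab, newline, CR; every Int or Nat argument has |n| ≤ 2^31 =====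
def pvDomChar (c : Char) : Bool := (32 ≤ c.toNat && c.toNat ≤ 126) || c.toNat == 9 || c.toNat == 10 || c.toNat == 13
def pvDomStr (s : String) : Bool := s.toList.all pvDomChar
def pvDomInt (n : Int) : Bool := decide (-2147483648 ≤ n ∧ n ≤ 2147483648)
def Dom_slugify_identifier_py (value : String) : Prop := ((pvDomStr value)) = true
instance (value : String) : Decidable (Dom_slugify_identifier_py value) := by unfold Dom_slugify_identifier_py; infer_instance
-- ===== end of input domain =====

-- B rebuilds the slug by tokenizing maximal alnum runs in one pass instead of char-mapping
-- then strip + collapse-while-loop (objective: simpler, same asymptotic cost).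

-- ===== PORT A =====
-- A's `while "--" in slug: slug = slug.replace("--","-")` needs a termination argument:
-- pvR is what one replace pass computes, and it strictly shrinks a string containing "--".
def pvR : List Char → List Char
  | [] => []
  | [c] => [c]
  | c :: d :: t => if c = '-' ∧ d = '-' then '-' :: pvR t else c :: pvR (d :: t)

theorem pvGo_eq_pvR : ∀ (fuel : Nat) (l acc : List Char), l.length ≤ fuel →
    PySem.Chars.replace.go ['-', '-'] ['-'] fuel l acc = acc.reverse ++ pvR l := by
  intro fuel
  induction fuel with
  | zero =>
    intro l acc h
    have : l = [] := by cases l <;> simp_all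
    subst this
    simp [PySem.Chars.replace.go, pvR]
  | succ n ih =>
    intro l acc h
    match l with
    | [] => simp [PySem.Chars.replace.go, pvR]
    | [c] =>
      have hpre : ¬ (['-','-'].isPrefixOf [c] = true) := by simp [List.isPrefixOf]
      simp only [PySem.Chars.replace.go, hpre, if_neg]
      rw [ih [] (c :: acc) (by simp)]
      simp [pvR]
    | c :: d :: t =>
      by_cases hc : c = '-' ∧ d = '-'
      · obtain ⟨rfl, rfl⟩ := hc
        have hpre : ['-','-'].isPrefixOf ('-' :: '-' :: t) = true := by simp [List.isPrefixOf]
        simp only [PySem.Chars.replace.go, hpre, if_pos]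
        rw [show List.drop ['-','-'].length ('-'::'-'::t) = t from rfl]
        rw [ih t _ (by simp at h ⊢; omega)]
        simp [pvR]
      · have hpre : ¬ (['-','-'].isPrefixOf (c :: d :: t) = true) := by
          simp [List.isPrefixOf]; intro h1 h2; exact hc ⟨h1.symm, h2.symm⟩
        simp only [PySem.Chars.replace.go, hpre, if_neg]
        rw [ih (d :: t) (c :: acc) (by simp at h ⊢; omega)]
        simp [pvR, hc]

theorem pvReplace_eq_pvR (s : List Char) :
    PySem.Chars.replace s ['-', '-'] ['-'] = pvR s := by
  simp [PySem.Chars.replace, pvGo_eq_pvR s.length s [] le_rfl]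

theorem pvR_length_le (l : List Char) : (pvR l).length ≤ l.length := by
  fun_induction pvR l with
  | case1 => simp
  | case2 => simp
  | case3 c d t h ih => simp; omega
  | case4 c d t h ih => simp at ih ⊢; omega

theorem pvR_length_lt (l : List Char) (h : ['-', '-'] <:+: l) : (pvR l).length < l.length := by
  fun_induction pvR l with
  | case1 => exact absurd h.length_le (by simp)
  | case2 c => exact absurd h.length_le (by simp)
  | case3 c d t hc ih =>
    have := pvR_length_le t
    simp; omega
  | case4 c d t hc ih =>
    have hinf : ['-','-'] <:+: d :: t := by
      obtain ⟨s, t', ht⟩ := h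
      match s, ht with
      | [], ht =>
        simp at ht
        exact absurd ⟨ht.1.symm, ht.2.1.symm⟩ hc
      | x :: s', ht =>
        refine ⟨s', t', ?_⟩
        injection ht
    have := ih hinf
    simp at this ⊢; omega

def pvCollapse (s : List Char) : List Char :=
  if h : PySem.Chars.isIn ['-', '-'] s = true then
    pvCollapse (PySem.Chars.replace s ['-', '-'] ['-'])
  else s
  termination_by s.length
  decreasing_by
    rw [pvReplace_eq_pvR]
    exact pvR_length_lt s ((PySem.Chars.isIn_iff_infix _ _).mp h)

def slugify_identifier_py (value : String) : String :=
  let chars : List (List Char) := value.toList.foldl (fun acc c =>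
    let lower := PySem.Chars.lower [c]
    if PySem.Chars.strIsalnum lower then acc ++ [lower] else acc ++ [['-']]) []
  let slug := PySem.Chars.stripChars (PySem.Chars.join [] chars) ['-']
  let slug := pvCollapse slug
  if slug = [] then "default" else String.ofList slug

-- ===== PORT B =====
def pvStepB (st : List (List Char) × List Char) (c : Char) : List (List Char) × List Char :=
  let lower := PySem.Chars.lower [c]
  if PySem.Chars.strIsalnum lower then (st.1, st.2 ++ lower)
  else if st.2 = [] then st else (st.1 ++ [st.2], [])

def slugify_identifier_py_alt (value : String) : String :=
  let st := value.toList.foldl pvStepB ([], [])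
  let tokens := if st.2 = [] then st.1 else st.1 ++ [st.2]
  let res := PySem.Chars.join ['-'] tokens
  if res = [] then "default" else String.ofList res

-- ===== PRECONDITION & SPEC =====
def Spec_slugify_identifier_py (value : String) (out : String) : Prop := out = slugify_identifier_py_alt value
instance (value : String) (out : String) : Decidable (Spec_slugify_identifier_py value out) := by unfold Spec_slugify_identifier_py; infer_instance

-- ===== CLAIM (what is proved, stated in full; the proofs are below) =====
def Claim_equal_slugify_identifier_py : Prop := ∀ (value : String), Dom_slugify_identifier_py value → Spec_slugify_identifier_py value (slugify_identifier_py value)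

-- ===== LEMMAS AND PROOFS =====
def pvIsDash (c : Char) : Bool := c == '-'
def pvNotDash (c : Char) : Bool := !(c == '-')

def pvSq : List Char → List Char
  | [] => []
  | c :: t =>
    if c == '-' then '-' :: pvSq (t.dropWhile pvIsDash) else c :: pvSq t
  termination_by l => l.length
  decreasing_by
    · have := List.length_dropWhile_le pvIsDash t; simp; omega
    · simp

def pvGroups : List Char → List (List Char)
  | [] => []
  | c :: t =>
    if c == '-' then pvGroups t
    else (c :: t.takeWhile pvNotDash) :: pvGroups (t.dropWhile pvNotDash)
  termination_by l => l.length
  decreasing_by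
    · simp
    · have := List.length_dropWhile_le pvNotDash t; simp; omega

theorem pvSq_nil : pvSq [] = [] := by rw [pvSq]

theorem pvGroups_nil : pvGroups [] = [] := by rw [pvGroups]

theorem pvSq_cons (c : Char) (t : List Char) :
    pvSq (c :: t) = if c = '-' then '-' :: pvSq (t.dropWhile pvIsDash) else c :: pvSq t := by
  rw [pvSq]; simp

theorem pvGroups_cons (c : Char) (t : List Char) :
    pvGroups (c :: t) = if c = '-' then pvGroups t
      else (c :: t.takeWhile pvNotDash) :: pvGroups (t.dropWhile pvNotDash) := by
  rw [pvGroups]; simp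

theorem pvMQ : ∀ (n : Nat) (v : List Char), v.length ≤ n →
    pvSq (pvR v) = pvSq v ∧
      pvSq ((pvR v).dropWhile pvIsDash) = pvSq (v.dropWhile pvIsDash) := by
  intro n
  induction n with
  | zero =>
    intro v h
    have : v = [] := by cases v <;> simp_all
    subst this; exact ⟨rfl, rfl⟩
  | succ n ih =>
    intro v h
    match v with
    | [] => exact ⟨rfl, rfl⟩
    | [c] => exact ⟨rfl, rfl⟩
    | c :: d :: t =>
      simp only [List.length_cons] at h
      by_cases hc : c = '-' ∧ d = '-'
      · obtain ⟨rfl, rfl⟩ := hc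
        have hR : pvR ('-' :: '-' :: t) = '-' :: pvR t := by simp [pvR]
        have hQ := (ih t (by omega)).2
        constructor
        · rw [hR]
          simp only [pvSq]
          simp [List.dropWhile_cons, pvIsDash, hQ]
        · rw [hR]
          simp [List.dropWhile_cons, pvIsDash, hQ]
      · have hR : pvR (c :: d :: t) = c :: pvR (d :: t) := by simp [pvR, hc]
        have hMdt : pvSq (pvR (d :: t)) = pvSq (d :: t) := (ih (d :: t) (by simp; omega)).1
        have hQdt : pvSq ((pvR (d :: t)).dropWhile pvIsDash) =
            pvSq ((d :: t).dropWhile pvIsDash) := (ih (d :: t) (by simp; omega)).2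
        by_cases h1 : c = '-'
        · subst h1
          constructor
          · rw [hR]
            simp only [pvSq]
            simp [hQdt]
          · rw [hR]
            simp [List.dropWhile_cons, pvIsDash, hQdt]
        · constructor
          · rw [hR, pvSq_cons, pvSq_cons]
            simp [h1, hMdt]
          · rw [hR]
            simp [List.dropWhile_cons, pvIsDash, h1]
            rw [pvSq_cons, pvSq_cons]
            simp [h1, hMdt]

theorem pvHead_dropWhile {p : Char → Bool} (l : List Char) (c : Char)
    (h : (l.dropWhile p).head? = some c) : p c = false := by
  have := List.head?_dropWhile_not p l
  rw [h] at this
  exact this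

theorem pvNoFix : ∀ (v : List Char), ¬ (['-','-'] <:+: v) → pvSq v = v := by
  have main : ∀ (n : Nat) (v : List Char), v.length ≤ n → ¬ (['-','-'] <:+: v) → pvSq v = v := by
    intro n
    induction n with
    | zero =>
      intro v hl _
      have : v = [] := by cases v <;> simp_all
      subst this; exact pvSq_nil
    | succ n ih =>
      intro v hl h
      match v with
      | [] => exact pvSq_nil
      | c :: t =>
        simp only [List.length_cons] at hl
        by_cases h1 : c = '-'
        · subst h1
          have ht : t.dropWhile pvIsDash = t := by
            match t with
            | [] => rfl
            | d :: t' =>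
              have hd : d ≠ '-' := by
                rintro rfl
                exact h ⟨[], t', rfl⟩
              simp [List.dropWhile_cons, pvIsDash, hd]
          rw [pvSq_cons, if_pos rfl, ht]
          rw [ih t (by omega) (fun hinf => h (List.infix_cons hinf))]
        · rw [pvSq_cons, if_neg h1]
          rw [ih t (by omega) (fun hinf => h (List.infix_cons hinf))]
  exact fun v => main v.length v le_rfl

theorem pvSq_nd_prefix (a x : List Char) (ha : ∀ c ∈ a, c ≠ '-') :
    pvSq (a ++ x) = a ++ pvSq x := by
  induction a with
  | nil => rfl
  | cons c a' ih =>
    simp only [List.cons_append]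
    rw [pvSq_cons, if_neg (ha c (by simp))]
    rw [ih (fun c hc => ha c (by simp [hc]))]

theorem pvGroups_dropWhile_dash (u : List Char) :
    pvGroups (u.dropWhile pvIsDash) = pvGroups u := by
  induction u with
  | nil => rfl
  | cons c t ih =>
    by_cases h1 : c = '-'
    · rw [List.dropWhile_cons]
      simp only [pvIsDash, h1, beq_self_eq_true, if_pos]
      rw [ih, pvGroups_cons]
      simp [h1]
    · rw [List.dropWhile_cons]
      simp [pvIsDash, h1]

theorem pvGroups_append_dash : ∀ (u : List Char), pvGroups (u ++ ['-']) = pvGroups u := by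
  have main : ∀ (n : Nat) (u : List Char), u.length ≤ n → pvGroups (u ++ ['-']) = pvGroups u := by
    intro n
    induction n with
    | zero =>
      intro u hl
      have : u = [] := by cases u <;> simp_all
      subst this; simp [pvGroups_cons, pvGroups_nil]
    | succ n ih =>
      intro u hl
      match u with
      | [] => simp [pvGroups_cons, pvGroups_nil]
      | c :: t =>
        simp only [List.length_cons] at hl
        by_cases h1 : c = '-'
        · rw [List.cons_append, pvGroups_cons, if_pos h1, pvGroups_cons, if_pos h1]
          exact ih t (by omega)
        · rw [List.cons_append, pvGroups_cons, if_neg h1, pvGroups_cons, if_neg h1]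
          by_cases hall : ∀ x ∈ t, pvNotDash x = true
          · have htk : t.takeWhile pvNotDash = t := List.takeWhile_eq_self_iff.mpr hall
            have hdr : t.dropWhile pvNotDash = [] := List.dropWhile_eq_nil_iff.mpr hall
            rw [List.takeWhile_append, List.dropWhile_append]
            refine ?_
            have h2 : pvGroups (List.dropWhile pvNotDash ['-']) = [] := by
              simp [List.dropWhile_cons, pvNotDash, pvGroups_nil, pvGroups_cons]
            simp [htk, hdr, pvGroups_cons, pvGroups_nil, pvNotDash, h2]
          · have hne : ¬ ((t.takeWhile pvNotDash).length = t.length) := by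
              intro hlen
              exact hall (List.takeWhile_eq_self_iff.mp
                ((List.takeWhile_prefix pvNotDash).eq_of_length hlen))
            have hdr : ¬ ((t.dropWhile pvNotDash).isEmpty = true) := by
              simp only [List.isEmpty_iff, List.dropWhile_eq_nil_iff]
              exact hall
            rw [List.takeWhile_append, List.dropWhile_append, if_neg hne, if_neg hdr]
            rw [ih (t.dropWhile pvNotDash) (le_trans (List.length_dropWhile_le _ _) (by omega))]
  exact fun u => main u.length u le_rfl

theorem pvGroups_append_dashes : ∀ (dl : List Char), (∀ c ∈ dl, c = '-') →
    ∀ (w : List Char), pvGroups (w ++ dl) = pvGroups w := by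
  intro dl
  induction dl with
  | nil => intro _ w; simp
  | cons c dl' ih =>
    intro h w
    have hc : c = '-' := h c (by simp)
    subst hc
    have : w ++ '-' :: dl' = (w ++ ['-']) ++ dl' := by simp
    rw [this, ih (fun c hc => h c (by simp [hc])), pvGroups_append_dash]

-- the key characterisation: on a list without leading or trailing dash,
-- collapsing dash runs equals joining the maximal non-dash groups with single dashes
theorem pvK : ∀ (v : List Char), v.head? ≠ some '-' → v.getLast? ≠ some '-' →
    pvSq v = PySem.Chars.join ['-'] (pvGroups v) := by
  have main : ∀ (n : Nat) (v : List Char), v.length ≤ n → v.head? ≠ some '-' →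
      v.getLast? ≠ some '-' → pvSq v = PySem.Chars.join ['-'] (pvGroups v) := by
    intro n
    induction n with
    | zero =>
      intro v hl _ _
      have : v = [] := by cases v <;> simp_all
      subst this
      simp [pvSq_nil, pvGroups_nil, PySem.Chars.join_nil]
    | succ n ih =>
      intro v hl hh hlast
      match v with
      | [] => simp [pvSq_nil, pvGroups_nil, PySem.Chars.join_nil]
      | c :: t =>
        simp only [List.length_cons] at hl
        have h1 : c ≠ '-' := by intro h; exact hh (by simp [h])
        set a := t.takeWhile pvNotDash with ha
        set r := t.dropWhile pvNotDash with hr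
        have hta : t = a ++ r := (List.takeWhile_append_dropWhile).symm
        have hv : c :: t = (c :: a) ++ r := by simp [hta]
        have hand : ∀ x ∈ c :: a, x ≠ '-' := by
          intro x hx
          rcases List.mem_cons.mp hx with rfl | hx
          · exact h1
          · have := List.mem_takeWhile_imp (ha ▸ hx)
            simpa [pvNotDash] using this
        have hsq : pvSq (c :: t) = (c :: a) ++ pvSq r := by
          rw [hv]; exact pvSq_nd_prefix _ _ hand
        have hgr : pvGroups (c :: t) = (c :: a) :: pvGroups r := by
          rw [pvGroups_cons, if_neg h1]
        rcases hrr : r with _ | ⟨rc, r₂⟩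
        · rw [hrr] at hsq hgr
          rw [hsq, hgr]
          simp [pvSq_nil, pvGroups_nil, PySem.Chars.join_singleton]
        · have hrc : rc = '-' := by
            have h0 : (t.dropWhile pvNotDash).head? = some rc := by rw [← hr, hrr]; rfl
            have := pvHead_dropWhile t rc h0
            simpa [pvNotDash] using this
          subst hrc
          rw [hrr] at hsq hgr
          have hlastr : ('-' :: r₂).getLast? ≠ some '-' := by
            rw [hv, hrr] at hlast
            rwa [List.getLast?_append,
              Option.or_of_isSome (by cases r₂ <;> simp)] at hlast
          have hw_ne : r₂.dropWhile pvIsDash ≠ [] := by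
            intro hnil
            have hall : ∀ x ∈ r₂, pvIsDash x = true := List.dropWhile_eq_nil_iff.mp hnil
            apply hlastr
            rcases List.eq_nil_or_concat r₂ with rfl | ⟨ys, y, rfl⟩
            · simp
            · have hy : y = '-' := by simpa [pvIsDash] using hall y (by simp)
              rw [List.concat_eq_append,
                show ('-' :: (ys ++ [y])) = ('-' :: ys) ++ [y] by simp,
                List.getLast?_append]
              simp [hy]
          have hwhead : (r₂.dropWhile pvIsDash).head? ≠ some '-' := by
            cases hhw : (r₂.dropWhile pvIsDash).head? with
            | none => simp
            | some x =>
              intro hx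
              have hx' : x = '-' := by injection hx
              have := pvHead_dropWhile r₂ x hhw
              simp [hx', pvIsDash] at this
          have hwlast : (r₂.dropWhile pvIsDash).getLast? ≠ some '-' := by
            obtain ⟨pre, hpre⟩ := List.dropWhile_suffix (l := r₂) pvIsDash
            have hsome : (r₂.dropWhile pvIsDash).getLast?.isSome = true := by
              cases hcc : r₂.dropWhile pvIsDash with
              | nil => exact absurd hcc hw_ne
              | cons x xs => simp
            have h2 : r₂.getLast? = (r₂.dropWhile pvIsDash).getLast? := by
              conv_lhs => rw [← hpre]
              rw [List.getLast?_append, Option.or_of_isSome hsome]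
            have h3 : ('-' :: r₂).getLast? = r₂.getLast? := by
              have hr2ne : r₂ ≠ [] := by
                rintro rfl
                simp only [List.dropWhile_nil] at hw_ne
                exact hw_ne rfl
              have hsome2 : r₂.getLast?.isSome = true := by
                rw [List.getLast?_isSome]
                exact hr2ne
              rw [show ('-' :: r₂) = ['-'] ++ r₂ by simp, List.getLast?_append,
                Option.or_of_isSome hsome2]
            rw [← h2, ← h3]
            exact hlastr
          have hlen : (r₂.dropWhile pvIsDash).length ≤ n := by
            have h4 := List.length_dropWhile_le pvIsDash r₂
            have h5 : r.length ≤ t.length := hr ▸ List.length_dropWhile_le pvNotDash t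
            rw [hrr] at h5
            simp only [List.length_cons] at h5
            omega
          have hIH := ih (r₂.dropWhile pvIsDash) hlen hwhead hwlast
          have hsqr : pvSq ('-' :: r₂) = '-' :: pvSq (r₂.dropWhile pvIsDash) := by
            rw [pvSq_cons, if_pos rfl]
          have hgrw : pvGroups ('-' :: r₂) = pvGroups (r₂.dropWhile pvIsDash) := by
            rw [pvGroups_cons, if_pos rfl, pvGroups_dropWhile_dash]
          obtain ⟨g1, gs, hg⟩ : ∃ g1 gs, pvGroups (r₂.dropWhile pvIsDash) = g1 :: gs := by
            cases hgc : pvGroups (r₂.dropWhile pvIsDash) with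
            | nil =>
              exfalso
              cases hwc : r₂.dropWhile pvIsDash with
              | nil => exact hw_ne hwc
              | cons x xs =>
                have hx : x ≠ '-' := by
                  intro hx
                  exact hwhead (by rw [hwc, hx]; rfl)
                rw [hwc, pvGroups_cons, if_neg hx] at hgc
                exact absurd hgc (by simp)
            | cons g1 gs => exact ⟨g1, gs, rfl⟩
          rw [hsq, hgr, hsqr, hgrw, hg, PySem.Chars.join_cons_cons]
          rw [hIH, hg]
          simp
  exact fun v => main v.length v le_rfl


theorem pvHead_dropdash (l : List Char) : (List.dropWhile pvIsDash l).head? ≠ some '-' := by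
  intro h
  have := pvHead_dropWhile l '-' h
  simp [pvIsDash] at this

theorem pvCollapse_eq_pvSq : ∀ (v : List Char), pvCollapse v = pvSq v := by
  have main : ∀ (n : Nat) (v : List Char), v.length ≤ n → pvCollapse v = pvSq v := by
    intro n
    induction n with
    | zero =>
      intro v hl
      have : v = [] := by cases v <;> simp_all
      subst this
      rw [pvCollapse, dif_neg (by decide)]
      exact pvSq_nil.symm
    | succ n ih =>
      intro v hl
      rw [pvCollapse]
      by_cases h : PySem.Chars.isIn ['-', '-'] v = true
      · rw [dif_pos h, pvReplace_eq_pvR]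
        have hlt := pvR_length_lt v ((PySem.Chars.isIn_iff_infix _ _).mp h)
        rw [ih (pvR v) (by omega)]
        exact (pvMQ v.length v le_rfl).1
      · rw [dif_neg h]
        have hni : ¬ (['-','-'] <:+: v) :=
          (PySem.Chars.isIn_eq_false_iff _ _).mp (Bool.not_eq_true _ ▸ eq_false_of_ne_true h)
        exact (pvNoFix v hni).symm
  exact fun v => main v.length v le_rfl

-- strip facts
theorem pvStrip_eq (u : List Char) :
    PySem.Chars.stripChars u ['-'] =
      (List.dropWhile pvIsDash ((List.dropWhile pvIsDash u).reverse)).reverse := by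
  have hp : (fun c => List.contains ['-'] c) = pvIsDash := by
    funext c
    simp [pvIsDash]
    rfl
  simp only [PySem.Chars.stripChars, hp]

theorem pvStrip_head (u : List Char) :
    (PySem.Chars.stripChars u ['-']).head? ≠ some '-' := by
  rw [pvStrip_eq]
  cases hc : (List.dropWhile pvIsDash ((List.dropWhile pvIsDash u).reverse)).reverse.head? with
  | none => simp
  | some x =>
    intro hx
    have hx' : x = '-' := by injection hx
    subst hx'
    have hsplit : (List.dropWhile pvIsDash u).reverse =
        List.takeWhile pvIsDash ((List.dropWhile pvIsDash u).reverse) ++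
          List.dropWhile pvIsDash ((List.dropWhile pvIsDash u).reverse) :=
      List.takeWhile_append_dropWhile.symm
    have hu1 : List.dropWhile pvIsDash u =
        (List.dropWhile pvIsDash ((List.dropWhile pvIsDash u).reverse)).reverse ++
          (List.takeWhile pvIsDash ((List.dropWhile pvIsDash u).reverse)).reverse := by
      conv_lhs => rw [← List.reverse_reverse (List.dropWhile pvIsDash u), hsplit]
      rw [List.reverse_append]
    have hhead : (List.dropWhile pvIsDash u).head? = some '-' := by
      rw [hu1, List.head?_append, hc]
      rfl
    exact pvHead_dropdash u hhead

theorem pvStrip_last (u : List Char) :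
    (PySem.Chars.stripChars u ['-']).getLast? ≠ some '-' := by
  rw [pvStrip_eq, List.getLast?_reverse]
  exact pvHead_dropdash _

theorem pvStrip_groups (u : List Char) :
    pvGroups (PySem.Chars.stripChars u ['-']) = pvGroups u := by
  rw [pvStrip_eq]
  have hsplit : (List.dropWhile pvIsDash u).reverse =
      List.takeWhile pvIsDash ((List.dropWhile pvIsDash u).reverse) ++
        List.dropWhile pvIsDash ((List.dropWhile pvIsDash u).reverse) :=
    List.takeWhile_append_dropWhile.symm
  have hu1 : List.dropWhile pvIsDash u =
      (List.dropWhile pvIsDash ((List.dropWhile pvIsDash u).reverse)).reverse ++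
        (List.takeWhile pvIsDash ((List.dropWhile pvIsDash u).reverse)).reverse := by
    conv_lhs => rw [← List.reverse_reverse (List.dropWhile pvIsDash u), hsplit]
    rw [List.reverse_append]
  have hdl : ∀ c ∈ (List.takeWhile pvIsDash ((List.dropWhile pvIsDash u).reverse)).reverse,
      c = '-' := by
    intro c hcm
    rw [List.mem_reverse] at hcm
    have := List.mem_takeWhile_imp hcm
    simpa [pvIsDash] using this
  calc pvGroups (List.dropWhile pvIsDash ((List.dropWhile pvIsDash u).reverse)).reverse
      = pvGroups (List.dropWhile pvIsDash u) := by
        conv_rhs => rw [hu1]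
        rw [pvGroups_append_dashes _ hdl]
    _ = pvGroups u := pvGroups_dropWhile_dash u

-- the per-character value both ports are driven by
def pvChar (c : Char) : Char :=
  if PySem.Chars.strIsalnum (PySem.Chars.lower [c]) then PySem.Chars.lowerChar c else '-'

theorem pvChar_dash (c : Char) (h : ¬ PySem.Chars.strIsalnum (PySem.Chars.lower [c]) = true) :
    pvChar c = '-' := by simp [pvChar, h]

theorem pvChar_alnum (c : Char) (h : PySem.Chars.strIsalnum (PySem.Chars.lower [c]) = true) :
    pvChar c = PySem.Chars.lowerChar c ∧ pvChar c ≠ '-' := by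
  refine ⟨by simp [pvChar, h], ?_⟩
  simp only [pvChar, h, if_pos]
  intro hd
  rw [show PySem.Chars.lower [c] = [PySem.Chars.lowerChar c] from rfl, hd] at h
  exact absurd h (by decide)

-- A's loop builds exactly the singleton pieces [pvChar c]
theorem pvAfold (s : List Char) :
    s.foldl (fun acc c =>
      let lower := PySem.Chars.lower [c]
      if PySem.Chars.strIsalnum lower then acc ++ [lower] else acc ++ [['-']]) [] =
      s.map (fun c => [pvChar c]) := by
  have hstep : (fun (acc : List (List Char)) c =>
      let lower := PySem.Chars.lower [c]
      if PySem.Chars.strIsalnum lower then acc ++ [lower] else acc ++ [['-']]) =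
      (fun acc c => acc ++ [[pvChar c]]) := by
    funext acc c
    by_cases h : PySem.Chars.strIsalnum (PySem.Chars.lower [c]) = true
    · simp [h, (pvChar_alnum c h).1]
      rfl
    · simp [h, pvChar_dash c h]
  rw [hstep, PySem.List.foldl_append_singleton_eq_map]
  simp

theorem pvJoin_nil (s : List Char) :
    PySem.Chars.join [] (s.map (fun c => [pvChar c])) = s.map pvChar := by
  have : s.map (fun c => [pvChar c]) = (s.map pvChar).map (fun c => [c]) := by
    rw [List.map_map]; rfl
  rw [this, PySem.Chars.join_nil_singletons]

-- B's loop in terms of the mapped characters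
def pvStepU (st : List (List Char) × List Char) (c : Char) : List (List Char) × List Char :=
  if c == '-' then (if st.2 = [] then st else (st.1 ++ [st.2], []))
  else (st.1, st.2 ++ [c])

theorem pvStepB_eq (st : List (List Char) × List Char) (c : Char) :
    pvStepB st c = pvStepU st (pvChar c) := by
  by_cases h : PySem.Chars.strIsalnum (PySem.Chars.lower [c]) = true
  · obtain ⟨h1, h2⟩ := pvChar_alnum c h
    have h3 : ((pvChar c) == '-') = false := beq_eq_false_iff_ne.mpr h2
    have h4 : PySem.Chars.lower [c] = [pvChar c] := by rw [h1]; rfl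
    simp only [pvStepB]
    rw [if_pos h]
    simp [pvStepU, h3, h4]
  · simp [pvStepB, pvStepU, h, pvChar_dash c h]

def pvGaux : List Char → List Char → List (List Char)
  | buf, [] => if buf = [] then [] else [buf]
  | buf, c :: t =>
    if c == '-' then (if buf = [] then pvGaux [] t else buf :: pvGaux [] t)
    else pvGaux (buf ++ [c]) t

theorem pvFoldU : ∀ (u : List Char) (tk : List (List Char)) (buf : List Char),
    (let st := u.foldl pvStepU (tk, buf)
     if st.2 = [] then st.1 else st.1 ++ [st.2]) = tk ++ pvGaux buf u := by
  intro u
  induction u with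
  | nil =>
    intro tk buf
    by_cases h : buf = [] <;> simp [pvGaux, h]
  | cons c t ih =>
    intro tk buf
    by_cases hc : c == '-'
    · by_cases hb : buf = []
      · simp only [List.foldl_cons, pvStepU, hc, if_pos, hb, if_pos]
        simpa [pvGaux, hc, hb] using ih tk []
      · simp only [List.foldl_cons, pvStepU, hc, if_pos, hb, if_neg]
        have := ih (tk ++ [buf]) []
        simp only [List.append_assoc] at this
        simpa [pvGaux, hc, hb] using this
    · simp only [List.foldl_cons, pvStepU, hc, if_neg]
      have := ih tk (buf ++ [c])
      simpa [pvGaux, hc] using this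

theorem pvGauxGroups : ∀ (n : Nat) (u : List Char), u.length ≤ n →
    pvGaux [] u = pvGroups u ∧
      ∀ buf, buf ≠ [] →
        pvGaux buf u = (buf ++ u.takeWhile pvNotDash) :: pvGroups (u.dropWhile pvNotDash) := by
  intro n
  induction n with
  | zero =>
    intro u hl
    have : u = [] := by cases u <;> simp_all
    subst this
    exact ⟨by simp [pvGaux, pvGroups_nil], fun buf hb => by simp [pvGaux, hb, pvGroups_nil]⟩
  | succ n ih =>
    intro u hl
    match u with
    | [] =>
      exact ⟨by simp [pvGaux, pvGroups_nil], fun buf hb => by simp [pvGaux, hb, pvGroups_nil]⟩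
    | c :: t =>
      simp only [List.length_cons] at hl
      by_cases hc : c = '-'
      · subst hc
        constructor
        · simp only [pvGaux, beq_self_eq_true, if_pos]
          rw [(ih t (by omega)).1, pvGroups_cons]
          simp
        · intro buf hb
          simp only [pvGaux, beq_self_eq_true, if_pos, hb, if_neg]
          rw [(ih t (by omega)).1]
          rw [List.takeWhile_cons, List.dropWhile_cons]
          simp only [pvNotDash, beq_self_eq_true, Bool.not_true]
          simp [pvGroups_cons]
      · have hcb : (c == '-') = false := beq_eq_false_iff_ne.mpr hc
        have hnd : pvNotDash c = true := by simp [pvNotDash, hcb]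
        constructor
        · simp only [pvGaux, hcb, Bool.false_eq_true, if_false]
          rw [show ([] ++ [c] : List Char) = [c] by simp]
          rw [(ih t (by omega)).2 [c] (by simp)]
          rw [pvGroups_cons, if_neg hc]
          simp
        · intro buf hb
          simp only [pvGaux, hcb, Bool.false_eq_true, if_false]
          rw [(ih t (by omega)).2 (buf ++ [c]) (by simp)]
          rw [List.takeWhile_cons, List.dropWhile_cons]
          simp [hnd]

-- ===== VERDICT (by name: the statement is the Claim_ definition above) =====
theorem slugify_identifier_py_spec : Claim_equal_slugify_identifier_py := by
  unfold Claim_equal_slugify_identifier_py Spec_slugify_identifier_py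
  intro value _
  unfold slugify_identifier_py slugify_identifier_py_alt
  simp only []
  have hA : PySem.Chars.join []
      (value.toList.foldl (fun acc c =>
        let lower := PySem.Chars.lower [c]
        if PySem.Chars.strIsalnum lower then acc ++ [lower] else acc ++ [['-']]) []) =
      value.toList.map pvChar := by
    rw [pvAfold, pvJoin_nil]
  have hAslug : pvCollapse (PySem.Chars.stripChars (value.toList.map pvChar) ['-']) =
      PySem.Chars.join ['-'] (pvGroups (value.toList.map pvChar)) := by
    rw [pvCollapse_eq_pvSq,
      pvK _ (pvStrip_head (value.toList.map pvChar)) (pvStrip_last (value.toList.map pvChar)),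
      pvStrip_groups]
  have hB : value.toList.foldl pvStepB ([], []) =
      (value.toList.map pvChar).foldl pvStepU ([], []) := by
    rw [List.foldl_map]
    have hf : pvStepB = fun a c => pvStepU a (pvChar c) :=
      funext fun a => funext fun c => pvStepB_eq a c
    rw [hf]
  have hBtok : (if ((value.toList.map pvChar).foldl pvStepU ([], [])).2 = []
        then ((value.toList.map pvChar).foldl pvStepU ([], [])).1
        else ((value.toList.map pvChar).foldl pvStepU ([], [])).1 ++
          [((value.toList.map pvChar).foldl pvStepU ([], [])).2]) =
      pvGroups (value.toList.map pvChar) := by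
    have := pvFoldU (value.toList.map pvChar) [] []
    simp only [List.nil_append] at this
    rw [this, (pvGauxGroups (value.toList.map pvChar).length _ le_rfl).1]
  rw [hA, hAslug, hB, hBtok]
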